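-- pv_equiv track=rewrite | github.com/CG-Labs/HAN | cv_data_preprocessing.py | construct_adjacency_matrix
-- ===== SOURCE A (Python) =====
-- def construct_adjacency_matrix(features):
--     """
--     Constructs an adjacency matrix from extracted features.
--     :param features: dict, a dictionary of extracted features
--     :return: list, a list of lists representing the adjacency matrix
--     """
--     # Updated adjacency matrix construction
--     adjacency_matrix = [[0] * len(features) for _ in range(len(features))]
--     for i, feature_items_i in enumerate(features.values()):
--         for j, feature_items_j in enumerate(features.values()):
--             if i != j and set(feature_items_i).intersection(set(feature_items_j)):
--                 adjacency_matrix[i][j] = 1  # Connection between different features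
--             else:
--                 adjacency_matrix[i][j] = 0
--     return adjacency_matrix
-- ===== SOURCE B (Python) =====
-- def construct_adjacency_matrix(features):
--     vals = [set(items) for items in features.values()]
--     n = len(vals)
--     index = {}
--     for i, s in enumerate(vals):
--         for x in s:
--             index.setdefault(x, []).append(i)
--     adjacency_matrix = [[0] * n for _ in range(n)]
--     for ids in index.values():
--         for i in ids:
--             for j in ids:
--                 if i != j:
--                     adjacency_matrix[i][j] = 1
--     return adjacency_matrix
-- ===== Notes on version B (the rewrite author's own statement) =====
-- stated objective: faster
-- what changed: Replaces the all-pairs loop that rebuilds both sets per pair with one pass that builds each feature's set once and an inverted index item->feature ids, then marks only pairs that actually share an item.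
import Mathlib
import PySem

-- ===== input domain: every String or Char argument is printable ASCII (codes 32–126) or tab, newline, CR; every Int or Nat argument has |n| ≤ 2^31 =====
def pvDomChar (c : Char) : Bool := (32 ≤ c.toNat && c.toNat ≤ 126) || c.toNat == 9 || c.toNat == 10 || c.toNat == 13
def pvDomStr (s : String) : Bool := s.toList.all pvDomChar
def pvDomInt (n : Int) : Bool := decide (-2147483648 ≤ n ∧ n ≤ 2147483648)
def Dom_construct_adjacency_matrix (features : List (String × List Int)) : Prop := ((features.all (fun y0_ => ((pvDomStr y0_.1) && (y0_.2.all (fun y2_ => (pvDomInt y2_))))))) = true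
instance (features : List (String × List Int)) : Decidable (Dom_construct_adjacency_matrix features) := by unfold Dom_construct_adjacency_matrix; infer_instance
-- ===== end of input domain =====

-- ===== PORT A =====
-- B replaces the all-pairs set-intersection loop by per-feature sets built once plus an
-- inverted index item -> feature ids (objective: faster).
-- helper shared by both ports: Python's `adjacency_matrix[i][j] = v`
def pySetCell (m : List (List Int)) (i j : Int) (v : Int) : List (List Int) :=
  PySem.List.pySetD m i (PySem.List.pySetD (PySem.List.pyGetD m i []) j v)

def construct_adjacency_matrix (features : List (String × List Int)) : List (List Int) :=
  let d := PySem.Dict.ofList features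
  let adjacency_matrix := List.replicate d.size (List.replicate d.size (0 : Int))
  (PySem.List.enumerate d.values 0).foldl (fun m p =>
    (PySem.List.enumerate d.values 0).foldl (fun m q =>
      if p.1 ≠ q.1 ∧ PySem.Set.inter (PySem.Set.ofList p.2) (PySem.Set.ofList q.2) ≠ [] then
        pySetCell m p.1 q.1 1
      else
        pySetCell m p.1 q.1 0) m) adjacency_matrix

-- ===== PORT B =====
def construct_adjacency_matrix_alt (features : List (String × List Int)) : List (List Int) :=
  let vals := (PySem.Dict.ofList features).values.map (fun items => PySem.Set.ofList items)
  let index := (PySem.List.enumerate vals 0).foldl (fun d p =>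
      p.2.foldl (fun d x => d.modify x [] (fun l => l ++ [p.1])) d) PySem.Dict.empty
  let adjacency_matrix := List.replicate vals.length (List.replicate vals.length (0 : Int))
  index.values.foldl (fun m ids =>
    ids.foldl (fun m i => ids.foldl (fun m j =>
      if i ≠ j then pySetCell m i j 1 else m) m) m) adjacency_matrix

-- ===== PRECONDITION & SPEC =====
def Spec_construct_adjacency_matrix (features : List (String × List Int)) (out : List (List Int)) : Prop := out = construct_adjacency_matrix_alt features
instance (features : List (String × List Int)) (out : List (List Int)) : Decidable (Spec_construct_adjacency_matrix features out) := by unfold Spec_construct_adjacency_matrix; infer_instance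

-- ===== CLAIM (what is proved, stated in full; the proofs are below) =====
def Claim_equal_construct_adjacency_matrix : Prop := ∀ (features : List (String × List Int)), Dom_construct_adjacency_matrix features → Spec_construct_adjacency_matrix features (construct_adjacency_matrix features)

-- ===== LEMMAS AND PROOFS =====

def natSet (m : List (List Int)) (x y : Nat) (v : Int) : List (List Int) :=
  m.set x ((m.getD x []).set y v)

def cell (m : List (List Int)) (a b : Nat) : Int := (m.getD a []).getD b 0

theorem getD_natSet (m : List (List Int)) (x y : Nat) (v : Int) (a : Nat) :
    (natSet m x y v).getD a [] =
      if x = a ∧ x < m.length then (m.getD x []).set y v else m.getD a [] := by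
  unfold natSet
  by_cases hxa : x = a
  · subst hxa
    by_cases hx : x < m.length
    · simp [List.getD, List.getElem?_set, hx]
    · simp [List.getD, List.getElem?_set, hx, List.getElem?_eq_none (by omega : m.length ≤ x)]
  · simp [List.getD, List.getElem?_set, hxa]

theorem length_natSet (m : List (List Int)) (x y : Nat) (v : Int) :
    (natSet m x y v).length = m.length := by
  simp [natSet]

theorem rowlen_natSet (m : List (List Int)) (x y : Nat) (v : Int) (a : Nat) :
    ((natSet m x y v).getD a []).length = (m.getD a []).length := by
  rw [getD_natSet]
  split_ifs with h
  · simp [h.1]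
  · rfl

theorem cell_natSet_ne (m : List (List Int)) (x y a b : Nat) (v : Int)
    (h : ¬(x = a ∧ y = b)) : cell (natSet m x y v) a b = cell m a b := by
  unfold cell
  rw [getD_natSet]
  split_ifs with hx
  · rcases hx with ⟨rfl, hlt⟩
    have hyb : y ≠ b := by tauto
    simp [List.getD, List.getElem?_set, hyb]
  · rfl

theorem cell_natSet_self (m : List (List Int)) (a b : Nat) (v : Int)
    (ha : a < m.length) (hb : b < (m.getD a []).length) :
    cell (natSet m a b v) a b = v := by
  have hb' : b < m[a].length := by rwa [List.getD_eq_getElem m [] ha] at hb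
  unfold cell
  rw [getD_natSet]
  simp [ha, List.getD, List.getElem?_set, hb']

def wfold {α : Type} (i1 i2 : α → Nat) (v : α → Int) (P : α → Bool)
    (W : List α) (m : List (List Int)) : List (List Int) :=
  W.foldl (fun m w => if P w then natSet m (i1 w) (i2 w) (v w) else m) m

theorem cell_wfold_untouched {α : Type} (i1 i2 : α → Nat) (v : α → Int) (P : α → Bool)
    (W : List α) (m : List (List Int)) (a b : Nat)
    (h : ∀ w ∈ W, P w = true → ¬(i1 w = a ∧ i2 w = b)) :
    cell (wfold i1 i2 v P W m) a b = cell m a b := by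
  induction W generalizing m with
  | nil => rfl
  | cons w W ih =>
    rw [wfold, List.foldl_cons, ← wfold, ih _ (fun w hw => h w (List.mem_cons_of_mem _ hw))]
    split_ifs with hp
    · exact cell_natSet_ne _ _ _ _ _ _ (h w (List.mem_cons_self) hp)
    · rfl

theorem cell_wfold_nodup {α : Type} (i1 i2 : α → Nat) (v : α → Int) (P : α → Bool)
    (W : List α) (m : List (List Int)) (w0 : α) (a b : Nat)
    (hnd : (W.map (fun w => (i1 w, i2 w))).Nodup)
    (hw0 : w0 ∈ W) (hp0 : P w0 = true) (h1 : i1 w0 = a) (h2 : i2 w0 = b)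
    (ha : a < m.length) (hb : b < (m.getD a []).length) :
    cell (wfold i1 i2 v P W m) a b = v w0 := by
  induction W generalizing m with
  | nil => cases hw0
  | cons w W ih =>
    rw [wfold, List.foldl_cons, ← wfold]
    rw [List.map_cons, List.nodup_cons] at hnd
    by_cases hkey : i1 w = a ∧ i2 w = b
    · -- w0 must be the head
      have hw0w : w0 = w := by
        rcases List.mem_cons.1 hw0 with h | h
        · exact h
        · exfalso
          apply hnd.1
          have he : (i1 w, i2 w) = (i1 w0, i2 w0) := by rw [hkey.1, hkey.2, h1, h2]
          rw [he]
          exact List.mem_map_of_mem h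
      subst hw0w
      rw [cell_wfold_untouched _ _ _ _ _ _ _ _ (by
        intro w' hw' hp' hk
        apply hnd.1
        have he : (i1 w0, i2 w0) = (i1 w', i2 w') := by rw [hk.1, hk.2, hkey.1, hkey.2]
        rw [he]
        exact List.mem_map_of_mem hw')]
      rw [if_pos hp0, ← h1, ← h2]
      exact cell_natSet_self _ _ _ _ (h1 ▸ ha) (by rw [h1, h2]; exact hb)
    · have hw0W : w0 ∈ W := by
        rcases List.mem_cons.1 hw0 with h | h
        · exfalso; exact hkey (h ▸ ⟨h1, h2⟩)
        · exact h
      split_ifs with hp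
      · exact ih _ hnd.2 hw0W (by rw [length_natSet]; exact ha)
          (by rw [rowlen_natSet]; exact hb)
      · exact ih _ hnd.2 hw0W ha hb

theorem cell_wfold_ones {α : Type} (i1 i2 : α → Nat) (P : α → Bool)
    (W : List α) (m : List (List Int)) (a b : Nat)
    (ha : a < m.length) (hb : b < (m.getD a []).length) :
    cell (wfold i1 i2 (fun _ => 1) P W m) a b =
      if ∃ w ∈ W, P w = true ∧ i1 w = a ∧ i2 w = b then 1 else cell m a b := by
  induction W generalizing m with
  | nil => simp [wfold]
  | cons w W ih =>
    rw [wfold, List.foldl_cons, ← wfold]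
    by_cases hk : P w = true ∧ i1 w = a ∧ i2 w = b
    · have hex : ∃ w' ∈ w :: W, P w' = true ∧ i1 w' = a ∧ i2 w' = b :=
        ⟨w, List.mem_cons_self, hk⟩
      rw [if_pos hex, if_pos hk.1]
      rw [ih _ (by rw [length_natSet]; exact ha) (by rw [rowlen_natSet]; exact hb)]
      split_ifs with h
      · rfl
      · rw [hk.2.1, hk.2.2]
        exact cell_natSet_self _ _ _ _ ha hb
    · have hcond : (∃ w' ∈ w :: W, P w' = true ∧ i1 w' = a ∧ i2 w' = b) ↔
          (∃ w' ∈ W, P w' = true ∧ i1 w' = a ∧ i2 w' = b) := by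
        constructor
        · rintro ⟨w', hw', hrest⟩
          rcases List.mem_cons.1 hw' with h | h
          · exact absurd (h ▸ hrest) hk
          · exact ⟨w', h, hrest⟩
        · rintro ⟨w', hw', hrest⟩; exact ⟨w', List.mem_cons_of_mem _ hw', hrest⟩
      rw [if_congr hcond rfl rfl]
      by_cases hp : P w = true
      · rw [if_pos hp]
        rw [ih _ (by rw [length_natSet]; exact ha) (by rw [rowlen_natSet]; exact hb)]
        by_cases h : ∃ w' ∈ W, P w' = true ∧ i1 w' = a ∧ i2 w' = b
        · rw [if_pos h, if_pos h]
        · rw [if_neg h, if_neg h]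
          exact cell_natSet_ne _ _ _ _ _ _ (fun hab => hk ⟨hp, hab⟩)
      · rw [if_neg hp]
        exact ih _ ha hb

theorem pySetCell_natCast (m : List (List Int)) (a b : Nat) (v : Int) :
    pySetCell m (a : Int) (b : Int) v = natSet m a b v := by
  simp [pySetCell, natSet]

theorem prod_eq_flatMap {β γ : Type} (l1 : List β) (l2 : List γ) :
    l1 ×ˢ l2 = l1.flatMap (fun a => l2.map (Prod.mk a)) := by
  simp [SProd.sprod, List.product]

theorem inter_ofList_ne_nil (s t : List Int) :
    PySem.Set.inter (PySem.Set.ofList s) (PySem.Set.ofList t) ≠ [] ↔ ∃ x, x ∈ s ∧ x ∈ t := by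
  rw [Ne, List.eq_nil_iff_forall_not_mem]
  push Not
  simp [PySem.Set.mem_inter, PySem.Set.mem_ofList]

theorem cell_replicate (n a b : Nat) :
    cell (List.replicate n (List.replicate n (0:Int))) a b = 0 := by
  simp only [cell, List.getD, List.getElem?_replicate]
  split_ifs <;> simp

theorem nested_to_product {β γ δ : Type} (l1 : List β) (l2 : List γ)
    (f : δ → β → γ → δ) (init : δ) :
    l1.foldl (fun m k => l2.foldl (fun m l => f m k l) m) init =
      (l1 ×ˢ l2).foldl (fun m p => f m p.1 p.2) init := by
  rw [prod_eq_flatMap, List.foldl_flatMap]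
  simp [List.foldl_map]

theorem getD_replicate_row (n a : Nat) (ha : a < n) :
    (List.replicate n (List.replicate n (0:Int))).getD a [] = List.replicate n 0 := by
  rw [List.getD_eq_getElem _ _ (by simpa using ha)]
  simp

theorem cellA (vs : List (List Int)) (a b : Nat) (ha : a < vs.length) (hb : b < vs.length) :
    cell ((PySem.List.enumerate vs 0).foldl (fun m p =>
      (PySem.List.enumerate vs 0).foldl (fun m q =>
        if p.1 ≠ q.1 ∧ PySem.Set.inter (PySem.Set.ofList p.2) (PySem.Set.ofList q.2) ≠ [] then
          pySetCell m p.1 q.1 1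
        else
          pySetCell m p.1 q.1 0) m)
      (List.replicate vs.length (List.replicate vs.length (0:Int)))) a b =
    if a ≠ b ∧ ∃ x, x ∈ vs.getD a [] ∧ x ∈ vs.getD b [] then 1 else 0 := by
  have henum : PySem.List.enumerate vs 0 =
      (List.range vs.length).map (fun k : Nat => ((k : Int), vs.getD k [])) := by
    rw [PySem.List.enumerate_eq_map_pyRange vs []]
    simp [PySem.List.len_eq, PySem.List.pyRange_zero_natCast, List.map_map, Function.comp_def]
  rw [henum, List.foldl_map]
  simp only [List.foldl_map]
  rw [nested_to_product]
  have hstep : (fun (m : List (List Int)) (p : Nat × Nat) =>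
      if ((p.1 : Int)) ≠ ((p.2 : Int)) ∧ PySem.Set.inter (PySem.Set.ofList (vs.getD p.1 []))
          (PySem.Set.ofList (vs.getD p.2 [])) ≠ [] then
        pySetCell m (p.1 : Int) (p.2 : Int) 1
      else
        pySetCell m (p.1 : Int) (p.2 : Int) 0) =
      (fun m w => if (fun _ : Nat × Nat => true) w = true then
        natSet m w.1 w.2 ((fun w : Nat × Nat =>
          if w.1 ≠ w.2 ∧ PySem.Set.inter (PySem.Set.ofList (vs.getD w.1 []))
            (PySem.Set.ofList (vs.getD w.2 [])) ≠ [] then (1:Int) else 0) w) else m) := by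
    funext m p
    simp only [ne_eq, Nat.cast_inj, if_true]
    split_ifs with h <;> simp [pySetCell_natCast]
  rw [hstep, ← wfold]
  have hmem : ((a, b) : Nat × Nat) ∈ List.range vs.length ×ˢ List.range vs.length := by
    simp [List.pair_mem_product, ha, hb]
  have hnd : (List.map (fun w : Nat × Nat => (w.1, w.2))
      (List.range vs.length ×ˢ List.range vs.length)).Nodup := by
    rw [show (List.map (fun w : Nat × Nat => (w.1, w.2))
        (List.range vs.length ×ˢ List.range vs.length)) =
        (List.range vs.length ×ˢ List.range vs.length) from by simp]
    exact List.Nodup.product (List.nodup_range) (List.nodup_range)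
  rw [cell_wfold_nodup _ _ _ _ (List.range vs.length ×ˢ List.range vs.length) _
      ((a, b) : Nat × Nat) a b hnd hmem rfl rfl rfl
      (by simpa using ha)
      (by rw [getD_replicate_row _ _ ha]; simpa using hb)]
  simp only [inter_ofList_ne_nil]

theorem mem_values_iff {κ ν : Type} [BEq κ] [LawfulBEq κ] (d : PySem.Dict κ ν)
    (hnd : d.keys.Nodup) (dflt : ν) (ids : ν) :
    ids ∈ d.values ↔ ∃ k ∈ d.keys, ids = d.getD k dflt := by
  rw [PySem.Dict.values_eq_map_keys d hnd dflt]
  simp [List.mem_map, eq_comm]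

theorem cellB (vs : List (List Int)) (a b : Nat) (ha : a < vs.length) (hb : b < vs.length) :
    cell (
      (((PySem.List.enumerate (vs.map (fun items => PySem.Set.ofList items)) 0).foldl
          (fun d p => p.2.foldl (fun d x => d.modify x [] (fun l => l ++ [p.1])) d)
          PySem.Dict.empty).values).foldl
        (fun m ids => ids.foldl (fun m i => ids.foldl (fun m j =>
          if i ≠ j then pySetCell m i j 1 else m) m) m)
        (List.replicate (vs.map (fun items => PySem.Set.ofList items)).length
          (List.replicate (vs.map (fun items => PySem.Set.ofList items)).length (0:Int)))) a b =
    if a ≠ b ∧ ∃ x, x ∈ vs.getD a [] ∧ x ∈ vs.getD b [] then 1 else 0 := by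
  have hlen : (vs.map (fun items => PySem.Set.ofList items)).length = vs.length :=
    List.length_map ..
  have hgetDmap : ∀ k : Nat, (vs.map (fun items => PySem.Set.ofList items)).getD k [] =
      PySem.Set.ofList (vs.getD k []) := by
    intro k
    simp only [List.getD, List.getElem?_map]
    cases h : vs[k]? <;> rfl
  have henum : PySem.List.enumerate (vs.map (fun items => PySem.Set.ofList items)) 0 =
      (List.range vs.length).map (fun k : Nat => ((k : Int), PySem.Set.ofList (vs.getD k []))) := by
    rw [PySem.List.enumerate_eq_map_pyRange _ []]
    simp only [PySem.List.len_eq, hlen, PySem.List.pyRange_zero_natCast, List.map_map,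
      Function.comp_def]
    refine List.map_congr_left ?_
    intro k hk
    cases h : vs[k]? <;> simp [List.getD, PySem.List.pyGetD_natCast, h] <;> rfl
  rw [henum, hlen]
  set L : List (Int × Int) := (List.range vs.length).flatMap
    (fun k : Nat => (PySem.Set.ofList (vs.getD k [])).map (fun x => (x, (k : Int)))) with hL
  have hindex : ((List.range vs.length).map
        (fun k : Nat => ((k : Int), PySem.Set.ofList (vs.getD k [])))).foldl
      (fun d p => p.2.foldl (fun d x => d.modify x [] (fun l => l ++ [p.1])) d)
      PySem.Dict.empty =
      L.foldl (fun d r => d.modify r.1 [] (fun l => l ++ [r.2])) PySem.Dict.empty := by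
    rw [hL, List.foldl_flatMap]
    simp [List.foldl_map]
  rw [hindex]
  set idx := L.foldl (fun d r => d.modify r.1 [] (fun l => l ++ [r.2])) PySem.Dict.empty with hidx
  have hnd : idx.keys.Nodup := by
    exact PySem.Dict.nodup_keys_foldl_modify_key L (fun r : Int × Int => r.1) []
      (fun _ r => fun l => l ++ [r.2]) PySem.Dict.empty (by simp [PySem.Dict.nodup_keys_empty])
  have hkeys : idx.keys = PySem.Set.ofList (L.map (fun r => r.1)) := by
    have h := PySem.Dict.keys_foldl_modify_key L (fun r : Int × Int => r.1) []
      (fun _ r => fun l => l ++ [r.2]) PySem.Dict.empty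
    rw [hidx]
    rw [h]
    simp [PySem.Dict.keys_empty, PySem.Set.update_nil_left]
  have hgetDidx : ∀ x : Int, idx.getD x [] = (L.filter (fun r => r.1 == x)).map (fun r => r.2) := by
    intro x
    have h := PySem.Dict.getD_foldl_modify_append L PySem.Dict.empty x
    simpa [PySem.Dict.getD_empty] using h
  have hmemIdx : ∀ (x i : Int), i ∈ idx.getD x [] ↔ (x, i) ∈ L := by
    intro x i
    rw [hgetDidx]
    simp only [List.mem_map, List.mem_filter, beq_iff_eq]
    constructor
    · rintro ⟨r, ⟨hr, hx⟩, hi⟩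
      have : r = (x, i) := Prod.ext hx hi
      exact this ▸ hr
    · intro h
      exact ⟨(x, i), ⟨h, rfl⟩, rfl⟩
  have hmemL : ∀ (x i : Int), (x, i) ∈ L ↔
      ∃ k : Nat, k < vs.length ∧ i = (k : Int) ∧ x ∈ vs.getD k [] := by
    intro x i
    simp only [hL, List.mem_flatMap, List.mem_range, List.mem_map, PySem.Set.mem_ofList,
      Prod.mk.injEq]
    constructor
    · rintro ⟨k, hk, x', hx', rfl, rfl⟩
      exact ⟨k, hk, rfl, hx'⟩
    · rintro ⟨k, hk, rfl, hx⟩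
      exact ⟨k, hk, x, hx, rfl, rfl⟩
  set WB : List (Int × Int) := idx.values.flatMap
    (fun ids => ids.flatMap (fun i => ids.map (fun j => (i, j)))) with hWB
  have hmemWB : ∀ (i j : Int), (i, j) ∈ WB ↔ ∃ x : Int, (x, i) ∈ L ∧ (x, j) ∈ L := by
    intro i j
    simp only [hWB, List.mem_flatMap, List.mem_map, Prod.mk.injEq]
    constructor
    · rintro ⟨ids, hids, i', hi', j', hj', rfl, rfl⟩
      obtain ⟨x, hxk, rfl⟩ := (mem_values_iff idx hnd [] ids).1 hids
      exact ⟨x, (hmemIdx x i').1 hi', (hmemIdx x j').1 hj'⟩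
    · rintro ⟨x, hxi, hxj⟩
      refine ⟨idx.getD x [], ?_, i, (hmemIdx x i).2 hxi, j, (hmemIdx x j).2 hxj, rfl, rfl⟩
      refine (mem_values_iff idx hnd [] _).2 ⟨x, ?_, rfl⟩
      rw [hkeys]
      rw [PySem.Set.mem_ofList]
      exact List.mem_map_of_mem hxi
  have hcast : ∀ w ∈ WB, ∃ (a' b' : Nat), w = ((a' : Int), (b' : Int)) ∧
      a' < vs.length ∧ b' < vs.length := by
    rintro ⟨i, j⟩ hw
    obtain ⟨x, hxi, hxj⟩ := (hmemWB i j).1 hw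
    obtain ⟨k1, hk1, rfl, _⟩ := (hmemL x i).1 hxi
    obtain ⟨k2, hk2, rfl, _⟩ := (hmemL x j).1 hxj
    exact ⟨k1, k2, rfl, hk1, hk2⟩
  have hWBfold : idx.values.foldl (fun m ids => ids.foldl (fun m i => ids.foldl (fun m j =>
        if i ≠ j then pySetCell m i j 1 else m) m) m)
        (List.replicate vs.length (List.replicate vs.length (0:Int))) =
      WB.foldl (fun m w => if w.1 ≠ w.2 then pySetCell m w.1 w.2 1 else m)
        (List.replicate vs.length (List.replicate vs.length (0:Int))) := by
    rw [hWB, List.foldl_flatMap]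
    simp [List.foldl_flatMap, List.foldl_map]
  rw [hWBfold]
  have hconv : WB.foldl (fun m w => if w.1 ≠ w.2 then pySetCell m w.1 w.2 1 else m)
        (List.replicate vs.length (List.replicate vs.length (0:Int))) =
      wfold Prod.fst Prod.snd (fun _ => 1) (fun w => decide (w.1 ≠ w.2))
        (WB.map (fun w => (w.1.toNat, w.2.toNat)))
        (List.replicate vs.length (List.replicate vs.length (0:Int))) := by
    rw [wfold, List.foldl_map]
    refine (PySem.List.foldl_congr_mem _ _ _ _ ?_)
    intro m w hw
    obtain ⟨a', b', rfl, _, _⟩ := hcast w hw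
    by_cases hab : a' = b'
    · simp [hab]
    · simp [hab, pySetCell_natCast]
  rw [hconv]
  rw [cell_wfold_ones _ _ _ _ _ a b (by simpa using ha)
    (by rw [getD_replicate_row _ _ ha]; simpa using hb)]
  rw [cell_replicate]
  have hfinal : (∃ w ∈ WB.map (fun w => (w.1.toNat, w.2.toNat)),
      (decide (w.1 ≠ w.2)) = true ∧ w.1 = a ∧ w.2 = b) ↔
      (a ≠ b ∧ ∃ x, x ∈ vs.getD a [] ∧ x ∈ vs.getD b []) := by
    constructor
    · rintro ⟨wn, hwn, hne, h1, h2⟩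
      obtain ⟨w, hw, rfl⟩ := List.mem_map.1 hwn
      obtain ⟨a', b', rfl, ha', hb'⟩ := hcast w hw
      simp only [Int.toNat_natCast] at h1 h2
      constructor
      · rw [← h1, ← h2]
        simpa using hne
      · obtain ⟨x, hx1, hx2⟩ := (hmemWB _ _).1 hw
        obtain ⟨k1, _, hik1, hxk1⟩ := (hmemL _ _).1 hx1
        obtain ⟨k2, _, hik2, hxk2⟩ := (hmemL _ _).1 hx2
        have e1 : k1 = a := by rw [← h1]; exact_mod_cast hik1.symm
        have e2 : k2 = b := by rw [← h2]; exact_mod_cast hik2.symm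
        exact ⟨x, e1 ▸ hxk1, e2 ▸ hxk2⟩
    · rintro ⟨hab, x, hxa, hxb⟩
      have hwB : ((a : Int), (b : Int)) ∈ WB := (hmemWB _ _).2
        ⟨x, (hmemL _ _).2 ⟨a, ha, rfl, hxa⟩, (hmemL _ _).2 ⟨b, hb, rfl, hxb⟩⟩
      exact ⟨_, List.mem_map_of_mem hwB, by simp [hab]⟩
  rw [if_congr hfinal rfl rfl]

theorem pyIdx?_lt_of_some (n : Nat) (i : Int) (k : Nat) (h : PySem.List.pyIdx? n i = some k) :
    k < n := by
  unfold PySem.List.pyIdx? at h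
  split_ifs at h <;> simp_all <;> omega

theorem length_pySetCell (m : List (List Int)) (i j : Int) (v : Int) :
    (pySetCell m i j v).length = m.length := by
  simp [pySetCell, PySem.List.length_pySetD]

theorem rowlen_pySetCell (m : List (List Int)) (i j : Int) (v : Int) (a : Nat) :
    ((pySetCell m i j v).getD a []).length = (m.getD a []).length := by
  have hform : pySetCell m i j v =
      (Option.map (fun k => m.set k (PySem.List.pySetD (PySem.List.pyGetD m i []) j v))
        (PySem.List.pyIdx? m.length i)).getD m := rfl
  rw [hform]
  cases h : PySem.List.pyIdx? m.length i with
  | none => rfl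
  | some k =>
    have hk : k < m.length := pyIdx?_lt_of_some _ _ _ h
    have hrow : PySem.List.pyGetD m i [] = m[k] := by
      simp [PySem.List.pyGetD, PySem.List.pyGet?, h, List.getElem?_eq_getElem hk]
    simp only [Option.map_some, Option.getD_some]
    by_cases hak : a = k
    · subst hak
      rw [List.getD_eq_getElem _ _ (by simpa using hk)]
      simp only [List.getElem_set_self]
      rw [PySem.List.length_pySetD, hrow, List.getD_eq_getElem _ _ hk]
    · have : k ≠ a := fun h' => hak h'.symm
      simp [List.getD, List.getElem?_set, this]

theorem foldl_dims {α : Type} (l : List α) (f : List (List Int) → α → List (List Int))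
    (h : ∀ m w, (f m w).length = m.length ∧
      ∀ a, ((f m w).getD a []).length = (m.getD a []).length)
    (m : List (List Int)) :
    (l.foldl f m).length = m.length ∧
      ∀ a, ((l.foldl f m).getD a []).length = (m.getD a []).length := by
  induction l generalizing m with
  | nil => exact ⟨rfl, fun _ => rfl⟩
  | cons w l ih =>
    rw [List.foldl_cons]
    obtain ⟨h1, h2⟩ := ih (f m w)
    exact ⟨h1.trans (h m w).1, fun a => (h2 a).trans ((h m w).2 a)⟩

theorem matrix_ext (M N : List (List Int)) (n : Nat) (hM : M.length = n) (hN : N.length = n)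
    (hMr : ∀ a, a < n → (M.getD a []).length = n)
    (hNr : ∀ a, a < n → (N.getD a []).length = n)
    (h : ∀ a b, a < n → b < n → cell M a b = cell N a b) : M = N := by
  apply List.ext_getElem (hM.trans hN.symm)
  intro a h1 h2
  have han : a < n := hM ▸ h1
  apply List.ext_getElem
  · rw [← List.getD_eq_getElem M [] h1, ← List.getD_eq_getElem N [] h2,
      hMr a han, hNr a han]
  · intro b hb1 hb2
    have hbn : b < n := by
      rw [← List.getD_eq_getElem M [] h1] at hb1
      rw [hMr a han] at hb1
      exact hb1
    have e1 : M[a][b] = cell M a b := by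
      unfold cell
      rw [List.getD_eq_getElem M [] h1, List.getD_eq_getElem _ _ hb1]
    have e2 : N[a][b] = cell N a b := by
      unfold cell
      rw [List.getD_eq_getElem N [] h2, List.getD_eq_getElem _ _ hb2]
    rw [e1, e2, h a b han hbn]

theorem AB_eq (vs : List (List Int)) :
    ((PySem.List.enumerate vs 0).foldl (fun m p =>
      (PySem.List.enumerate vs 0).foldl (fun m q =>
        if p.1 ≠ q.1 ∧ PySem.Set.inter (PySem.Set.ofList p.2) (PySem.Set.ofList q.2) ≠ [] then
          pySetCell m p.1 q.1 1
        else
          pySetCell m p.1 q.1 0) m)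
      (List.replicate vs.length (List.replicate vs.length (0:Int)))) =
    ((((PySem.List.enumerate (vs.map (fun items => PySem.Set.ofList items)) 0).foldl
          (fun d p => p.2.foldl (fun d x => d.modify x [] (fun l => l ++ [p.1])) d)
          PySem.Dict.empty).values).foldl
        (fun m ids => ids.foldl (fun m i => ids.foldl (fun m j =>
          if i ≠ j then pySetCell m i j 1 else m) m) m)
        (List.replicate (vs.map (fun items => PySem.Set.ofList items)).length
          (List.replicate (vs.map (fun items => PySem.Set.ofList items)).length (0:Int)))) := by
  have hcellstep : ∀ (m : List (List Int)) (i j v : Int),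
      (pySetCell m i j v).length = m.length ∧
        ∀ a, ((pySetCell m i j v).getD a []).length = (m.getD a []).length :=
    fun m i j v => ⟨length_pySetCell m i j v, fun a => rowlen_pySetCell m i j v a⟩
  have hA := foldl_dims (PySem.List.enumerate vs 0)
    (fun m p => (PySem.List.enumerate vs 0).foldl (fun m q =>
      if p.1 ≠ q.1 ∧ PySem.Set.inter (PySem.Set.ofList p.2) (PySem.Set.ofList q.2) ≠ [] then
        pySetCell m p.1 q.1 1
      else
        pySetCell m p.1 q.1 0) m)
    (fun m p => foldl_dims (PySem.List.enumerate vs 0)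
      (fun m q =>
        if p.1 ≠ q.1 ∧ PySem.Set.inter (PySem.Set.ofList p.2) (PySem.Set.ofList q.2) ≠ [] then
          pySetCell m p.1 q.1 1
        else
          pySetCell m p.1 q.1 0)
      (fun m q => by
        dsimp only
        split_ifs <;> exact hcellstep _ _ _ _) m)
    (List.replicate vs.length (List.replicate vs.length (0:Int)))
  have hB := foldl_dims (((PySem.List.enumerate (vs.map (fun items => PySem.Set.ofList items)) 0).foldl
          (fun d p => p.2.foldl (fun d x => d.modify x [] (fun l => l ++ [p.1])) d)
          PySem.Dict.empty).values)
    (fun m ids => ids.foldl (fun m i => ids.foldl (fun m j =>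
      if i ≠ j then pySetCell m i j 1 else m) m) m)
    (fun m ids => foldl_dims ids
      (fun m i => ids.foldl (fun m j => if i ≠ j then pySetCell m i j 1 else m) m)
      (fun m i => foldl_dims ids
        (fun m j => if i ≠ j then pySetCell m i j 1 else m)
        (fun m j => by
          dsimp only
          split_ifs with h
          · exact hcellstep _ _ _ _
          · exact ⟨rfl, fun _ => rfl⟩) m) m)
    (List.replicate (vs.map (fun items => PySem.Set.ofList items)).length
      (List.replicate (vs.map (fun items => PySem.Set.ofList items)).length (0:Int)))
  refine matrix_ext _ _ vs.length ?_ ?_ ?_ ?_ ?_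
  · rw [hA.1]
    simp
  · rw [hB.1]
    simp
  · intro a ha
    rw [hA.2 a, getD_replicate_row _ _ ha]
    simp
  · intro a ha
    rw [hB.2 a]
    simp only [List.length_map]
    rw [getD_replicate_row _ _ ha]
    simp
  · intro a b ha hb
    rw [cellA vs a b ha hb, cellB vs a b ha hb]


-- ===== VERDICT (by name: the statement is the Claim_ definition above) =====
theorem construct_adjacency_matrix_spec : Claim_equal_construct_adjacency_matrix := by
  intro features _
  unfold Spec_construct_adjacency_matrix
  unfold construct_adjacency_matrix construct_adjacency_matrix_alt
  have hsize : (PySem.Dict.ofList features).size =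
      ((PySem.Dict.ofList features).values).length := by
    simp [PySem.Dict.size, PySem.Dict.values]
  show ((PySem.List.enumerate (PySem.Dict.ofList features).values 0).foldl (fun m p =>
      (PySem.List.enumerate (PySem.Dict.ofList features).values 0).foldl (fun m q =>
        if p.1 ≠ q.1 ∧ PySem.Set.inter (PySem.Set.ofList p.2) (PySem.Set.ofList q.2) ≠ [] then
          pySetCell m p.1 q.1 1
        else
          pySetCell m p.1 q.1 0) m)
      (List.replicate (PySem.Dict.ofList features).size
        (List.replicate (PySem.Dict.ofList features).size (0:Int)))) = _
  rw [hsize]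
  exact AB_eq ((PySem.Dict.ofList features).values)
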